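-- pv_equiv track=rewrite | github.com/Attednev/Advent-of-C- | 2024/day14.py | let_time_pass
-- ===== SOURCE A (Python) =====
-- WIDTH = 101
--
-- HEIGHT = 103
--
-- def let_time_pass(positions, time):
--     for i in range(time):
--         new_positions = []
--         for p_x, p_y, v_x, v_y in positions:
--             new_x = (p_x + v_x + WIDTH) % WIDTH
--             new_y = (p_y + v_y + HEIGHT) % HEIGHT
--             new_positions.append((new_x, new_y, v_x, v_y))
--         positions = new_positions
--     return positions
-- ===== SOURCE B (Python) =====
-- WIDTH = 101
--
-- HEIGHT = 103
--
-- def let_time_pass(positions, time):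
--     if time <= 0:
--         return positions
--     xs = [(p_x + v_x * time) % WIDTH for p_x, _, v_x, _ in positions]
--     ys = [(p_y + v_y * time) % HEIGHT for _, p_y, _, v_y in positions]
--     return [(x, y, p[2], p[3]) for x, y, p in zip(xs, ys, positions)]
-- ===== Notes on version B (the rewrite author's own statement) =====
-- stated objective: faster
-- what changed: Replaces the per-time-step simulation loop with the closed form (p + v*time) mod dimension, computed in staged component-wise passes (x-list, y-list, then zip).
import Mathlib
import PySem

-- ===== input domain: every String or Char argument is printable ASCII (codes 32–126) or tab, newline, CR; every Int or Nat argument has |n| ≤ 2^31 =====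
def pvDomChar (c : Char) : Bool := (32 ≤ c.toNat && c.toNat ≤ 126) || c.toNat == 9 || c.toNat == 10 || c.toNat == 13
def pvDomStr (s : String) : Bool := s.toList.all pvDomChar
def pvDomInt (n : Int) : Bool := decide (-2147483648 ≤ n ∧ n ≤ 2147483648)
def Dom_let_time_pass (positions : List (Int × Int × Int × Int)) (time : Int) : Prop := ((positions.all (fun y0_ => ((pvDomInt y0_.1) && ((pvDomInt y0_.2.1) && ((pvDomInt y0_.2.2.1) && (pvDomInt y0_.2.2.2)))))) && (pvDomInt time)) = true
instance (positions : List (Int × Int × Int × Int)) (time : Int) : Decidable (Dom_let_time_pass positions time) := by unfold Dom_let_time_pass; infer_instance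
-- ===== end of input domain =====

-- B replaces A's per-step simulation loop with the closed form (p + v*time) mod dimension, computed in staged component-wise passes (x-list, y-list, then zip) — asymptotically faster.

-- ===== PORT A =====
-- literal port: for i in range(time): rebuild the list, one step per iteration
def let_time_pass (positions : List (Int × Int × Int × Int)) (time : Int) : List (Int × Int × Int × Int) :=
  (PySem.List.pyRange 0 time 1).foldl
    (fun pos _ =>
      pos.foldl (fun acc q =>
        acc ++ [(PySem.Int.mod (q.1 + q.2.2.1 + 101) 101,
                 PySem.Int.mod (q.2.1 + q.2.2.2 + 103) 103,
                 q.2.2.1, q.2.2.2)]) [])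
    positions

-- ===== PORT B =====
-- staged passes: the list of new x-coordinates, the list of new y-coordinates, then zip
def let_time_pass_alt (positions : List (Int × Int × Int × Int)) (time : Int) : List (Int × Int × Int × Int) :=
  if time ≤ 0 then positions
  else
    let xs := positions.map (fun q => PySem.Int.mod (q.1 + q.2.2.1 * time) 101)
    let ys := positions.map (fun q => PySem.Int.mod (q.2.1 + q.2.2.2 * time) 103)
    (xs.zip (ys.zip positions)).map (fun t => (t.1, t.2.1, t.2.2.2.2.1, t.2.2.2.2.2))

-- ===== PRECONDITION & SPEC =====
def Spec_let_time_pass (positions : List (Int × Int × Int × Int)) (time : Int) (out : List (Int × Int × Int × Int)) : Prop := out = let_time_pass_alt positions time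
instance (positions : List (Int × Int × Int × Int)) (time : Int) (out : List (Int × Int × Int × Int)) : Decidable (Spec_let_time_pass positions time out) := by unfold Spec_let_time_pass; infer_instance

-- ===== CLAIM =====
def Claim_equal_let_time_pass : Prop := ∀ (positions : List (Int × Int × Int × Int)) (time : Int), Dom_let_time_pass positions time → Spec_let_time_pass positions time (let_time_pass positions time)

-- ===== LEMMAS AND PROOFS =====

lemma mod_init (a : Int) :
    PySem.Int.mod (a + 101) 101 = PySem.Int.mod a 101 := by
  rw [PySem.Int.mod_eq_emod_of_pos (by norm_num), PySem.Int.mod_eq_emod_of_pos (by norm_num)]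
  omega

lemma mod_init' (a : Int) :
    PySem.Int.mod (a + 103) 103 = PySem.Int.mod a 103 := by
  rw [PySem.Int.mod_eq_emod_of_pos (by norm_num), PySem.Int.mod_eq_emod_of_pos (by norm_num)]
  omega

lemma mod_step (a v : Int) :
    PySem.Int.mod (PySem.Int.mod a 101 + v + 101) 101 = PySem.Int.mod (a + v) 101 := by
  rw [PySem.Int.mod_eq_emod_of_pos (a := a) (by norm_num),
      PySem.Int.mod_eq_emod_of_pos (by norm_num),
      PySem.Int.mod_eq_emod_of_pos (by norm_num)]
  omega

lemma mod_step' (a v : Int) :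
    PySem.Int.mod (PySem.Int.mod a 103 + v + 103) 103 = PySem.Int.mod (a + v) 103 := by
  rw [PySem.Int.mod_eq_emod_of_pos (a := a) (by norm_num),
      PySem.Int.mod_eq_emod_of_pos (by norm_num),
      PySem.Int.mod_eq_emod_of_pos (by norm_num)]
  omega

-- the n+1-step simulation is the closed form at time n+1
lemma foldl_steps_closed (n : Nat) (pos : List (Int × Int × Int × Int)) :
    (PySem.List.pyRange 0 ((n : Int) + 1) 1).foldl
      (fun pos _ =>
        pos.foldl (fun acc q =>
          acc ++ [(PySem.Int.mod (q.1 + q.2.2.1 + 101) 101,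
                   PySem.Int.mod (q.2.1 + q.2.2.2 + 103) 103,
                   q.2.2.1, q.2.2.2)]) [])
      pos
    = pos.map (fun q =>
        (PySem.Int.mod (q.1 + q.2.2.1 * ((n : Int) + 1)) 101,
         PySem.Int.mod (q.2.1 + q.2.2.2 * ((n : Int) + 1)) 103,
         q.2.2.1, q.2.2.2)) := by
  induction n generalizing pos with
  | zero =>
    rw [show ((0 : Nat) : Int) + 1 = (0 : Int) + 1 by norm_num,
        PySem.List.pyRange_one_singleton]
    simp only [List.foldl_cons, List.foldl_nil,
      PySem.List.foldl_append_singleton_eq_map, List.nil_append]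
    apply List.map_congr_left
    intro q _
    rw [show (0 : Int) + 1 = 1 by norm_num, mul_one, mul_one, mod_init, mod_init']
  | succ m ih =>
    have hsplit : PySem.List.pyRange 0 ((↑(m + 1) : Int) + 1) 1
        = PySem.List.pyRange 0 ((↑m : Int) + 1) 1 ++ [(↑m : Int) + 1] := by
      have := PySem.List.pyRange_one_succ_right (a := 0) (b := (↑m : Int) + 1) (by positivity)
      push_cast
      push_cast at this
      convert this using 2
    rw [hsplit, List.foldl_append, ih]
    simp only [List.foldl_cons, List.foldl_nil,
      PySem.List.foldl_append_singleton_eq_map, List.nil_append, List.map_map]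
    apply List.map_congr_left
    intro q _
    simp only [Function.comp_apply]
    rw [mod_step, mod_step']
    congr 1
    · congr 1; push_cast; ring
    congr 1
    · congr 1; push_cast; ring

-- B's staged zip of the two component maps is the single fused map
lemma zip_maps_eq_map (pos : List (Int × Int × Int × Int)) (time : Int) :
    ((pos.map (fun q => PySem.Int.mod (q.1 + q.2.2.1 * time) 101)).zip
      ((pos.map (fun q => PySem.Int.mod (q.2.1 + q.2.2.2 * time) 103)).zip pos)).map
        (fun t => (t.1, t.2.1, t.2.2.2.2.1, t.2.2.2.2.2))
    = pos.map (fun q =>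
        (PySem.Int.mod (q.1 + q.2.2.1 * time) 101,
         PySem.Int.mod (q.2.1 + q.2.2.2 * time) 103,
         q.2.2.1, q.2.2.2)) := by
  induction pos with
  | nil => rfl
  | cons q rest ih => simpa using ih

-- ===== VERDICT =====
theorem let_time_pass_spec : Claim_equal_let_time_pass := by
  intro positions time _
  unfold Spec_let_time_pass let_time_pass let_time_pass_alt
  by_cases h : time ≤ 0
  · rw [PySem.List.pyRange_one_eq_nil h, if_pos h, List.foldl_nil]
  · rw [if_neg h]
    simp only [zip_maps_eq_map]
    have ht : time = ((time.toNat - 1 : Nat) : Int) + 1 := by omega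
    rw [ht]
    exact foldl_steps_closed (time.toNat - 1) positions
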